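-- pv_equiv track=rewrite | github.com/soiejung/Algorithm | 프로그래머스/lv1/1845. 폰켓몬/폰켓몬.py | solution
-- ===== SOURCE A (Python) =====
-- def solution(nums):
--     answer = 0
--     hash = {}
--     sizeOfnums = len(nums)
--     max = int(sizeOfnums/2)
--     for i in nums:
--         hash[i] = 1
--     count = len(hash.keys())
--     if count <= max:
--         answer = count
--     else:
--         answer = max
--
--     return answer
-- ===== SOURCE B (Python) =====
-- def solution(nums):
--     s = sorted(nums)
--     distinct = 0
--     prev = None
--     for x in s:
--         if x != prev:
--             distinct += 1
--         prev = x
--     return min(distinct, len(nums) // 2)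
-- ===== Notes on version B (the rewrite author's own statement) =====
-- stated objective: alternative
-- what changed: Replaces hash-based distinct counting (build a dict, count its keys) with sort-then-run-length: sort a copy and count value changes in one scan, then cap at len(nums)//2 via min.
import Mathlib
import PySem

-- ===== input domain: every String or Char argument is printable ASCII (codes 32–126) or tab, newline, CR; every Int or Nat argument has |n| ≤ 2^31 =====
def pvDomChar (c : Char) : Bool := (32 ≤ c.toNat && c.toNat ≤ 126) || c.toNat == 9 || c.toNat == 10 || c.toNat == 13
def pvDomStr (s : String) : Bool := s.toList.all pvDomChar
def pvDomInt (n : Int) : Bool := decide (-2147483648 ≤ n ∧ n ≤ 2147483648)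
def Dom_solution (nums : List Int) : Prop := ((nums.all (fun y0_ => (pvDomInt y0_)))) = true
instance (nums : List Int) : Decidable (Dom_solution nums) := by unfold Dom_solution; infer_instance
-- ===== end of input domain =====

-- B replaces the hash-based distinct count with a sort-then-run-length scan; same result, no speed claim.

-- ===== PORT A =====
-- int(len(nums)/2): exact as Int division here since len(nums) ≥ 0 (truncation = floor on nonnegatives)
def solution (nums : List Int) : Int :=
  let hash := nums.foldl (fun (d : PySem.Dict Int Int) i => d.insert i 1) PySem.Dict.empty
  let max := (nums.length : Int) / 2
  let count := (hash.keys.length : Int)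
  if count ≤ max then count else max

-- ===== PORT B =====
-- the loop state is (distinct, prev); 'x != prev' with prev : Option Int (None = none)
def solution_alt (nums : List Int) : Int :=
  let s := PySem.List.sorted nums (fun x => x) false
  let st := s.foldl (fun (st : Int × Option Int) x =>
      (if some x ≠ st.2 then st.1 + 1 else st.1, some x)) (0, none)
  min st.1 ((nums.length : Int) / 2)

-- ===== PRECONDITION & SPEC =====
def Spec_solution (nums : List Int) (out : Int) : Prop := out = solution_alt nums
instance (nums : List Int) (out : Int) : Decidable (Spec_solution nums out) := by unfold Spec_solution; infer_instance

-- ===== CLAIM (what is proved, stated in full; the proofs are below) =====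
def Claim_equal_solution : Prop := ∀ (nums : List Int), Dom_solution nums → Spec_solution nums (solution nums)

-- ===== LEMMAS AND PROOFS =====

-- run-length distinct count, the recursion behind B's fold
theorem card_insert_erase (x : Int) (s : Finset Int) :
    ((insert x s).card : Int) = ((s.erase x).card : Int) + 1 := by
  rw [show insert x s = insert x (s.erase x) by ext y; simp only [Finset.mem_insert, Finset.mem_erase]; tauto,
    Finset.card_insert_of_notMem (Finset.notMem_erase _ _)]
  simp

def rc (p : Option Int) : List Int → Int
  | [] => 0
  | x :: t => (if some x ≠ p then 1 else 0) + rc (some x) t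

theorem rc_foldl (l : List Int) : ∀ (c : Int) (p : Option Int),
    (l.foldl (fun (st : Int × Option Int) x =>
      (if some x ≠ st.2 then st.1 + 1 else st.1, some x)) (c, p)).1 = c + rc p l := by
  induction l with
  | nil => intro c p; simp [rc]
  | cons x t ih =>
    intro c p
    simp only [List.foldl, rc]
    rw [ih]
    split_ifs <;> ring

theorem rc_some_sorted (l : List Int) : ∀ (a : Int), (a :: l).Pairwise (· ≤ ·) →
    rc (some a) l = ((l.toFinset.erase a).card : Int) := by
  induction l with
  | nil => intro a _; simp [rc]
  | cons x t ih =>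
    intro a hp
    have hax : a ≤ x := (List.pairwise_cons.1 hp).1 x (by simp)
    have hxt : (x :: t).Pairwise (· ≤ ·) := (List.pairwise_cons.1 hp).2
    by_cases hxa : x = a
    · subst hxa
      have := ih x hxt
      rw [show rc (some x) (x :: t) = rc (some x) t by simp [rc]]
      rw [this]
      have he : ((x :: t).toFinset).erase x = t.toFinset.erase x := by
        rw [List.toFinset_cons]; ext y; simp only [Finset.mem_erase, Finset.mem_insert]; tauto
      rw [he]
    · have hant : a ∉ t := by
        intro hat
        have hxa' : x ≤ a := (List.pairwise_cons.1 hxt).1 a hat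
        exact hxa (le_antisymm hxa' hax)
      have := ih x hxt
      simp only [rc, ne_eq, Option.some.injEq, hxa, not_false_eq_true, if_pos]
      rw [this]
      have her : ((x :: t).toFinset.erase a) = (x :: t).toFinset := by
        apply Finset.erase_eq_of_notMem
        simp [List.mem_toFinset, hant, Ne.symm hxa]
      rw [her, List.toFinset_cons, card_insert_erase]
      push_cast; ring

theorem rc_none_sorted (l : List Int) (hp : l.Pairwise (· ≤ ·)) :
    rc none l = (l.toFinset.card : Int) := by
  cases l with
  | nil => simp [rc]
  | cons a t =>
    simp only [rc, ne_eq, reduceCtorEq, not_false_eq_true, if_pos]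
    rw [rc_some_sorted t a hp]
    rw [List.toFinset_cons, card_insert_erase]
    ring

theorem keys_length (nums : List Int) :
    ((nums.foldl (fun (d : PySem.Dict Int Int) i => d.insert i 1) PySem.Dict.empty).keys.length : Int)
      = (nums.toFinset.card : Int) := by
  have hk : (nums.foldl (fun (d : PySem.Dict Int Int) i => d.insert i 1) PySem.Dict.empty).keys
      = PySem.Set.update (PySem.Dict.empty : PySem.Dict Int Int).keys nums :=
    PySem.Dict.keys_foldl_insert (f := fun _ _ => (1 : Int)) nums PySem.Dict.empty
  have hk2 : PySem.Set.update (PySem.Dict.empty : PySem.Dict Int Int).keys nums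
      = PySem.Set.ofList nums := rfl
  rw [hk, hk2]
  have hnd : (PySem.Set.ofList nums).Nodup := PySem.Set.nodup_ofList nums
  have hfin : (PySem.Set.ofList nums).toFinset = nums.toFinset := by
    ext x; simp [List.mem_toFinset, PySem.Set.mem_ofList]
  rw [← List.toFinset_card_of_nodup hnd, hfin]

-- ===== VERDICT (by name: the statement is the Claim_ definition above) =====
theorem solution_spec : Claim_equal_solution := by
  intro nums _
  unfold Spec_solution solution solution_alt
  simp only []
  rw [rc_foldl, zero_add, rc_none_sorted _ (PySem.List.sorted_pairwise nums (fun x => x)),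
    List.toFinset_eq_of_perm _ _ (PySem.List.sorted_perm nums (fun x => x) false), keys_length]
  by_cases h : ((nums.toFinset.card : Int)) ≤ ((nums.length : Int) / 2)
  · rw [if_pos h, min_eq_left h]
  · rw [if_neg h, min_eq_right (le_of_lt (lt_of_not_ge h))]
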